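-- pv_equiv track=rewrite | github.com/morganID/SCRAPPERBOKEP | stream_getter/pipeline/downloader.py | pick_best_url
-- ===== SOURCE A (Python) =====
-- from typing import Optional, Dict, Any
--
-- def pick_best_url(m3u8_urls: list) -> Optional[str]:
--     """
--     Select the best URL from a list of m3u8 URLs.
--
--     Prioritizes index.m3u8 and master.m3u8 files.
--
--     Args:
--         m3u8_urls: List of m3u8 URLs.
--
--     Returns:
--         Best URL or None if list is empty.
--     """
--     if not m3u8_urls:
--         return None
--
--     # Priority: index > master > first available
--     for keyword in ['index.m3u8', 'master.m3u8']:
--         for url in m3u8_urls: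
--             if keyword in url.lower():
--                 return url
--
--     return m3u8_urls[0]
-- ===== SOURCE B (Python) =====
-- def pick_best_url(m3u8_urls: list):
--     if not m3u8_urls:
--         return None
--     first_index = None
--     first_master = None
--     for url in m3u8_urls:
--         lo = url.lower()
--         if first_index is None and 'index.m3u8' in lo:
--             first_index = url
--         if first_master is None and 'master.m3u8' in lo:
--             first_master = url
--     if first_index is not None:
--         return first_index
--     if first_master is not None:
--         return first_master
--     return m3u8_urls[0]
-- ===== Notes on version B (the rewrite author's own statement) =====
-- stated objective: alternative
-- what changed: Replaces A's two full keyword passes (outer loop over ['index.m3u8','master.m3u8'], inner rescan of the list) with one single pass that lowercases each url once and accumulates the first index.m3u8 and first master.m3u8 candidates.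
import Mathlib
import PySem

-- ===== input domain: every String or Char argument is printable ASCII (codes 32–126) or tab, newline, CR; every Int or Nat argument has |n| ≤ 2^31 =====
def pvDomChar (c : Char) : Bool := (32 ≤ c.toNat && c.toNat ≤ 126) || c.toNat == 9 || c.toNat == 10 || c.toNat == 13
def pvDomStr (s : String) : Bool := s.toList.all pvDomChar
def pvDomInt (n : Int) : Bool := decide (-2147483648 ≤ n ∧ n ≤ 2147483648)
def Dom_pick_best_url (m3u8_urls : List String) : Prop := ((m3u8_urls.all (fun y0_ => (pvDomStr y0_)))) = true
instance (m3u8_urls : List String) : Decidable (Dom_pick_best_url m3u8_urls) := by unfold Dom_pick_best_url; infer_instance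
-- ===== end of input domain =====

-- B replaces A's two nested keyword passes by one single pass that lowercases each url once and accumulates both candidates (objective: alternative decomposition).

-- ===== PORT A =====
-- inner loop 'for url in m3u8_urls: if keyword in url.lower(): return url'
def pvFindUrl (keyword : String) (urls : List String) : Option String :=
  match urls with
  | [] => none
  | u :: rest => if PySem.Str.isIn keyword (PySem.Str.lower u) then some u else pvFindUrl keyword rest

def pick_best_url (m3u8_urls : List String) : Option String :=
  if m3u8_urls.isEmpty then none
  else
    -- outer loop over the literal keyword list ['index.m3u8', 'master.m3u8'], unrolled
    match pvFindUrl "index.m3u8" m3u8_urls with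
    | some u => some u
    | none =>
      match pvFindUrl "master.m3u8" m3u8_urls with
      | some u => some u
      | none => m3u8_urls.head?   -- m3u8_urls[0]; the list is nonempty on this branch

-- ===== PORT B =====
-- single pass maintaining first_index / first_master
def pvScanUrls (urls : List String) (first_index first_master : Option String) :
    Option String × Option String :=
  match urls with
  | [] => (first_index, first_master)
  | u :: rest =>
    let lo := PySem.Str.lower u
    let fi := if first_index.isNone && PySem.Str.isIn "index.m3u8" lo then some u else first_index
    let fm := if first_master.isNone && PySem.Str.isIn "master.m3u8" lo then some u else first_master
    pvScanUrls rest fi fm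

def pick_best_url_alt (m3u8_urls : List String) : Option String :=
  if m3u8_urls.isEmpty then none
  else
    match pvScanUrls m3u8_urls none none with
    | (some u, _) => some u
    | (none, some u) => some u
    | (none, none) => m3u8_urls.head?

-- ===== PRECONDITION & SPEC =====
def Spec_pick_best_url (m3u8_urls : List String) (out : Option String) : Prop := out = pick_best_url_alt m3u8_urls
instance (m3u8_urls : List String) (out : Option String) : Decidable (Spec_pick_best_url m3u8_urls out) := by unfold Spec_pick_best_url; infer_instance

-- ===== CLAIM (what is proved, stated in full; the proofs are below) =====
def Claim_equal_pick_best_url : Prop := ∀ (m3u8_urls : List String), Dom_pick_best_url m3u8_urls → Spec_pick_best_url m3u8_urls (pick_best_url m3u8_urls)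

-- ===== LEMMAS AND PROOFS =====
theorem pvScanUrls_eq (urls : List String) (fi fm : Option String) :
    pvScanUrls urls fi fm =
      (fi.orElse (fun _ => pvFindUrl "index.m3u8" urls),
       fm.orElse (fun _ => pvFindUrl "master.m3u8" urls)) := by
  induction urls generalizing fi fm with
  | nil => cases fi <;> cases fm <;> simp [pvScanUrls, pvFindUrl]
  | cons u rest ih =>
    simp only [pvScanUrls, pvFindUrl, ih]
    cases h1 : PySem.Str.isIn "index.m3u8" (PySem.Str.lower u) <;>
      cases h2 : PySem.Str.isIn "master.m3u8" (PySem.Str.lower u) <;>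
      cases fi <;> cases fm <;>
      simp only [Option.isNone, Bool.and_true, Bool.and_false, if_true, Option.orElse] <;> rfl

-- ===== VERDICT (by name: the statement is the Claim_ definition above) =====
theorem pick_best_url_spec : Claim_equal_pick_best_url := by
  intro urls _
  unfold Spec_pick_best_url pick_best_url pick_best_url_alt
  rw [pvScanUrls_eq]
  cases hi : pvFindUrl "index.m3u8" urls <;>
    cases hm : pvFindUrl "master.m3u8" urls <;>
    simp [Option.orElse]
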